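-- pv_equiv track=rewrite | github.com/Eddy-dev0/Stocks.. | StockPredictor/stock_predictor/core/modeling/main.py | _categorize_feature_name
-- ===== SOURCE A (Python) =====
-- def _categorize_feature_name(name: str) -> str:
--     token = name.lower()
--     if any(keyword in token for keyword in ("rsi", "macd", "bollinger", "sma", "ema", "atr", "return")):
--         return "technical"
--     if "sentiment" in token:
--         return "sentiment"
--     if any(keyword in token for keyword in ("volatility", "trend", "correlation")):
--         return "macro"
--     if any(keyword in token for keyword in ("price_to", "momentum", "liquidity")):
--         return "fundamental"
--     if "volume" in token or "obv" in token:
--         return "price"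
--     return "other"
-- ===== SOURCE B (Python) =====
-- _KEYWORD_PRIORITY = {
--     "rsi": 0, "macd": 0, "bollinger": 0, "sma": 0, "ema": 0, "atr": 0, "return": 0,
--     "sentiment": 1,
--     "volatility": 2, "trend": 2, "correlation": 2,
--     "price_to": 3, "momentum": 3, "liquidity": 3,
--     "volume": 4, "obv": 4,
-- }
-- _CATEGORIES = ["technical", "sentiment", "macro", "fundamental", "price", "other"]
--
--
-- def _categorize_feature_name(name: str) -> str:
--     token = name.lower()
--     best = len(_CATEGORIES) - 1
--     for i in range(len(token)):
--         for keyword, priority in _KEYWORD_PRIORITY.items():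
--             if priority < best and token.startswith(keyword, i):
--                 best = priority
--     return _CATEGORIES[best]
-- ===== Notes on version B (the rewrite author's own statement) =====
-- stated objective: alternative
-- what changed: A's per-category substring cascade with early return is replaced by a single left-to-right scan over the character positions of the lowercased name: at each position a keyword->priority table is consulted and an accumulator keeps the minimum matched priority, which indexes a category list at the end (no 'in' substring operator, no branch cascade).
import Mathlib
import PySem

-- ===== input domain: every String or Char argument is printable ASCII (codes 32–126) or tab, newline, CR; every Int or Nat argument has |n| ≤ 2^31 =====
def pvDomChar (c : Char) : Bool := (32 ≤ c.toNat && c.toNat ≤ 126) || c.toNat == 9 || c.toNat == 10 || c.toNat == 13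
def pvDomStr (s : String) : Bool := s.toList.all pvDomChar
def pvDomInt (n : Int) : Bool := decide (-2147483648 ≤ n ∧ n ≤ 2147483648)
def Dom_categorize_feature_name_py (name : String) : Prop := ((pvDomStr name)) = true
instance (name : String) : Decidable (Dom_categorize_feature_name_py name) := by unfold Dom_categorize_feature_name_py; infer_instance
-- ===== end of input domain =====

-- B replaces A's per-category substring cascade by a single scan over character positions
-- keeping the minimum matched keyword priority (alternative algorithm, same result).

-- ===== PORT A =====
def categorize_feature_name_py (name : String) : String :=
  let token := PySem.Str.lower name
  if ["rsi", "macd", "bollinger", "sma", "ema", "atr", "return"].any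
      (fun keyword => PySem.Str.isIn keyword token) then "technical"
  else if PySem.Str.isIn "sentiment" token then "sentiment"
  else if ["volatility", "trend", "correlation"].any
      (fun keyword => PySem.Str.isIn keyword token) then "macro"
  else if ["price_to", "momentum", "liquidity"].any
      (fun keyword => PySem.Str.isIn keyword token) then "fundamental"
  else if PySem.Str.isIn "volume" token || PySem.Str.isIn "obv" token then "price"
  else "other"

-- ===== PORT B =====
-- Source B's _KEYWORD_PRIORITY dict in insertion order (keywords as char lists: matching is char-level)
def pvKwPrio : List (List Char × Nat) :=
  [("rsi".toList, 0), ("macd".toList, 0), ("bollinger".toList, 0), ("sma".toList, 0),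
   ("ema".toList, 0), ("atr".toList, 0), ("return".toList, 0),
   ("sentiment".toList, 1),
   ("volatility".toList, 2), ("trend".toList, 2), ("correlation".toList, 2),
   ("price_to".toList, 3), ("momentum".toList, 3), ("liquidity".toList, 3),
   ("volume".toList, 4), ("obv".toList, 4)]

def pvCategories : List String :=
  ["technical", "sentiment", "macro", "fundamental", "price", "other"]

-- token.startswith(keyword, i) with 0 ≤ i < len(token) is exactly
-- PySem.Chars.startswith (token.drop i) keyword (Python-exact on this range).
def categorize_feature_name_py_alt (name : String) : String :=
  let token := PySem.Chars.lower name.toList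
  let best := (List.range token.length).foldl (fun best i =>
      pvKwPrio.foldl (fun b kp =>
        if kp.2 < b ∧ PySem.Chars.startswith (token.drop i) kp.1 = true then kp.2 else b) best)
    (pvCategories.length - 1)
  pvCategories.getD best "other"

-- ===== PRECONDITION & SPEC =====
def Spec_categorize_feature_name_py (name : String) (out : String) : Prop := out = categorize_feature_name_py_alt name
instance (name : String) (out : String) : Decidable (Spec_categorize_feature_name_py name out) := by unfold Spec_categorize_feature_name_py; infer_instance

-- ===== CLAIM (what is proved, stated in full; the proofs are below) =====
def Claim_equal_categorize_feature_name_py : Prop := ∀ (name : String), Dom_categorize_feature_name_py name → Spec_categorize_feature_name_py name (categorize_feature_name_py name)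

-- ===== LEMMAS AND PROOFS =====

-- B's accumulator loop, abstracted over the token
def pvBest (token : List Char) : Nat :=
  (List.range token.length).foldl (fun best i =>
      pvKwPrio.foldl (fun b kp =>
        if kp.2 < b ∧ PySem.Chars.startswith (token.drop i) kp.1 = true then kp.2 else b) best) 5

-- the multiset of priorities matched anywhere in the token
def pvFlat (token : List Char) : List Nat :=
  (List.range token.length).flatMap (fun i =>
    ((pvKwPrio.filter (fun kp => PySem.Chars.startswith (token.drop i) kp.1)).map (·.2)))

lemma pv_foldl_guard_min (L : List (List Char × Nat)) (m : List Char → Bool) (b : Nat) :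
    L.foldl (fun b kp => if kp.2 < b ∧ m kp.1 = true then kp.2 else b) b
      = ((L.filter (fun kp => m kp.1)).map (·.2)).foldl min b := by
  induction L generalizing b with
  | nil => rfl
  | cons kp t ih =>
    by_cases h : m kp.1 = true
    · simp only [List.foldl_cons, List.filter_cons, h, if_true, List.map_cons]
      rw [ih]
      congr 1
      simp only [and_true]
      split_ifs <;> omega
    · simp only [List.foldl_cons, List.filter_cons, h, Bool.false_eq_true, and_false, if_false]
      exact ih b

lemma pvBest_eq_foldl_min (token : List Char) :
    pvBest token = (pvFlat token).foldl min 5 := by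
  unfold pvBest pvFlat
  have hfun : (fun (best : Nat) (i : Nat) =>
      pvKwPrio.foldl (fun b kp =>
        if kp.2 < b ∧ PySem.Chars.startswith (token.drop i) kp.1 = true then kp.2 else b) best)
      = fun (best : Nat) (i : Nat) =>
        (((pvKwPrio.filter (fun kp => PySem.Chars.startswith (token.drop i) kp.1)).map (·.2)).foldl
          min best) := by
    funext best i
    exact pv_foldl_guard_min pvKwPrio _ best
  rw [hfun, List.foldl_flatMap]

lemma pv_foldl_min_le_init (l : List Nat) (b : Nat) : l.foldl min b ≤ b := by
  induction l generalizing b with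
  | nil => simp
  | cons x t ih => exact le_trans (ih (min b x)) (min_le_left _ _)

lemma pv_foldl_min_le_mem {l : List Nat} {x : Nat} (h : x ∈ l) (b : Nat) :
    l.foldl min b ≤ x := by
  induction l generalizing b with
  | nil => cases h
  | cons y t ih =>
    rcases List.mem_cons.mp h with rfl | h
    · exact le_trans (pv_foldl_min_le_init t (min b x)) (min_le_right _ _)
    · exact ih h (min b y)

lemma pv_foldl_min_mem_or (l : List Nat) (b : Nat) : l.foldl min b = b ∨ l.foldl min b ∈ l := by
  induction l generalizing b with
  | nil => exact Or.inl rfl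
  | cons x t ih =>
    rcases ih (min b x) with h | h
    · rcases Nat.le_total b x with hbx | hbx
      · exact Or.inl (by simpa [Nat.min_eq_left hbx] using h)
      · right
        rw [List.foldl_cons, h, Nat.min_eq_right hbx]
        exact List.mem_cons_self ..
    · exact Or.inr (List.mem_cons_of_mem _ h)

lemma pv_matchAt_iff (token kw : List Char) (hkw : kw ≠ []) :
    (∃ i, i < token.length ∧ PySem.Chars.startswith (token.drop i) kw = true)
      ↔ PySem.Chars.isIn kw token = true := by
  rw [← PySem.Chars.exists_prefix_drop_iff_isIn]
  constructor
  · rintro ⟨i, _, h⟩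
    exact ⟨i, (PySem.Chars.startswith_iff _ _).mp h⟩
  · rintro ⟨j, h⟩
    by_cases hj : j < token.length
    · exact ⟨j, hj, (PySem.Chars.startswith_iff _ _).mpr h⟩
    · exfalso
      rw [List.drop_eq_nil_of_le (by omega)] at h
      exact hkw (List.prefix_nil.mp h)

lemma pv_mem_flat (token : List Char) (x : Nat) :
    x ∈ pvFlat token ↔ ∃ kp ∈ pvKwPrio, PySem.Chars.isIn kp.1 token = true ∧ kp.2 = x := by
  have hne : ∀ kp ∈ pvKwPrio, kp.1 ≠ [] := by decide
  simp only [pvFlat, List.mem_flatMap, List.mem_range, List.mem_map, List.mem_filter]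
  constructor
  · rintro ⟨i, hi, kp, ⟨hkp, hsw⟩, hx⟩
    exact ⟨kp, hkp, (pv_matchAt_iff token kp.1 (hne kp hkp)).mp ⟨i, hi, hsw⟩, hx⟩
  · rintro ⟨kp, hkp, hin, hx⟩
    obtain ⟨i, hi, hsw⟩ := (pv_matchAt_iff token kp.1 (hne kp hkp)).mpr hin
    exact ⟨i, hi, kp, ⟨hkp, hsw⟩, hx⟩

lemma pvBest_spec (token : List Char) :
    pvBest token =
      if 0 ∈ pvFlat token then 0
      else if 1 ∈ pvFlat token then 1
      else if 2 ∈ pvFlat token then 2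
      else if 3 ∈ pvFlat token then 3
      else if 4 ∈ pvFlat token then 4
      else 5 := by
  rw [pvBest_eq_foldl_min]
  set l := pvFlat token with hl
  have hub : ∀ x ∈ l, x ≤ 4 := by
    intro x hx
    obtain ⟨kp, hkp, _, hx⟩ := (pv_mem_flat token x).mp (hl ▸ hx)
    have : ∀ kp ∈ pvKwPrio, kp.2 ≤ 4 := by decide
    have := this kp hkp
    omega
  have hor := pv_foldl_min_mem_or l 5
  split_ifs with h0 h1 h2 h3 h4
  · exact Nat.le_zero.mp (pv_foldl_min_le_mem h0 5)
  · have hle := pv_foldl_min_le_mem h1 5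
    rcases hor with h | h
    · omega
    · have e0 : List.foldl min 5 l ≠ 0 := fun e => h0 (e ▸ h)
      omega
  · have hle := pv_foldl_min_le_mem h2 5
    rcases hor with h | h
    · omega
    · have e0 : List.foldl min 5 l ≠ 0 := fun e => h0 (e ▸ h)
      have e1 : List.foldl min 5 l ≠ 1 := fun e => h1 (e ▸ h)
      omega
  · have hle := pv_foldl_min_le_mem h3 5
    rcases hor with h | h
    · omega
    · have e0 : List.foldl min 5 l ≠ 0 := fun e => h0 (e ▸ h)
      have e1 : List.foldl min 5 l ≠ 1 := fun e => h1 (e ▸ h)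
      have e2 : List.foldl min 5 l ≠ 2 := fun e => h2 (e ▸ h)
      omega
  · have hle := pv_foldl_min_le_mem h4 5
    rcases hor with h | h
    · omega
    · have e0 : List.foldl min 5 l ≠ 0 := fun e => h0 (e ▸ h)
      have e1 : List.foldl min 5 l ≠ 1 := fun e => h1 (e ▸ h)
      have e2 : List.foldl min 5 l ≠ 2 := fun e => h2 (e ▸ h)
      have e3 : List.foldl min 5 l ≠ 3 := fun e => h3 (e ▸ h)
      omega
  · rcases hor with h | h
    · exact h
    · have hub' := hub _ h
      have e0 : List.foldl min 5 l ≠ 0 := fun e => h0 (e ▸ h)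
      have e1 : List.foldl min 5 l ≠ 1 := fun e => h1 (e ▸ h)
      have e2 : List.foldl min 5 l ≠ 2 := fun e => h2 (e ▸ h)
      have e3 : List.foldl min 5 l ≠ 3 := fun e => h3 (e ▸ h)
      have e4 : List.foldl min 5 l ≠ 4 := fun e => h4 (e ▸ h)
      omega

lemma pv_group0 (token : List Char) :
    0 ∈ pvFlat token ↔
      (PySem.Chars.isIn "rsi".toList token = true ∨ PySem.Chars.isIn "macd".toList token = true ∨
       PySem.Chars.isIn "bollinger".toList token = true ∨ PySem.Chars.isIn "sma".toList token = true ∨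
       PySem.Chars.isIn "ema".toList token = true ∨ PySem.Chars.isIn "atr".toList token = true ∨
       PySem.Chars.isIn "return".toList token = true) := by
  rw [pv_mem_flat]; simp [pvKwPrio]

lemma pv_group1 (token : List Char) :
    1 ∈ pvFlat token ↔ PySem.Chars.isIn "sentiment".toList token = true := by
  rw [pv_mem_flat]; simp [pvKwPrio]

lemma pv_group2 (token : List Char) :
    2 ∈ pvFlat token ↔
      (PySem.Chars.isIn "volatility".toList token = true ∨ PySem.Chars.isIn "trend".toList token = true ∨
       PySem.Chars.isIn "correlation".toList token = true) := by
  rw [pv_mem_flat]; simp [pvKwPrio]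

lemma pv_group3 (token : List Char) :
    3 ∈ pvFlat token ↔
      (PySem.Chars.isIn "price_to".toList token = true ∨ PySem.Chars.isIn "momentum".toList token = true ∨
       PySem.Chars.isIn "liquidity".toList token = true) := by
  rw [pv_mem_flat]; simp [pvKwPrio]

lemma pv_group4 (token : List Char) :
    4 ∈ pvFlat token ↔
      (PySem.Chars.isIn "volume".toList token = true ∨ PySem.Chars.isIn "obv".toList token = true) := by
  rw [pv_mem_flat]; simp [pvKwPrio]

lemma pv_main (name : String) :
    categorize_feature_name_py name = categorize_feature_name_py_alt name := by
  unfold categorize_feature_name_py categorize_feature_name_py_alt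
  simp only [PySem.Str.isIn_eq, PySem.Str.toList_lower, List.any_cons, List.any_nil,
    Bool.or_false, Bool.or_eq_true]
  set token := PySem.Chars.lower name.toList with htok
  have hbest : (List.range token.length).foldl (fun best i =>
      pvKwPrio.foldl (fun b kp =>
        if kp.2 < b ∧ PySem.Chars.startswith (token.drop i) kp.1 = true then kp.2 else b) best)
      (pvCategories.length - 1) = pvBest token := rfl
  rw [hbest, pvBest_spec]
  simp only [pv_group0, pv_group1, pv_group2, pv_group3, pv_group4]
  split_ifs <;> rfl

-- ===== VERDICT (by name: the statement is the Claim_ definition above) =====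
theorem categorize_feature_name_py_spec : Claim_equal_categorize_feature_name_py := by
  intro name _
  exact pv_main name
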